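-- pv_equiv track=rewrite | github.com/jinhseo/algorithm | programmers/lv1/220811_plus_minus.py | solution
-- ===== SOURCE A (Python) =====
-- def solution(absolutes, signs):
--     answer = 0
--     for (abs, sign) in zip(absolutes, signs):
--         if sign:
--             answer += abs
--         else:
--             answer -= abs
--     return answer
-- ===== SOURCE B (Python) =====
-- def solution(absolutes, signs):
--     total = sum(a for a, _ in zip(absolutes, signs))
--     total -= 2 * sum(a for a, s in zip(absolutes, signs) if not s)
--     return total
-- ===== Notes on version B (the rewrite author's own statement) =====
-- stated objective: alternative
-- what changed: Replaces the per-element branch-and-accumulate loop with a full-sum-then-correct structure: sum all paired absolutes once, then subtract twice the sum of those whose sign is falsy.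
import Mathlib
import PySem

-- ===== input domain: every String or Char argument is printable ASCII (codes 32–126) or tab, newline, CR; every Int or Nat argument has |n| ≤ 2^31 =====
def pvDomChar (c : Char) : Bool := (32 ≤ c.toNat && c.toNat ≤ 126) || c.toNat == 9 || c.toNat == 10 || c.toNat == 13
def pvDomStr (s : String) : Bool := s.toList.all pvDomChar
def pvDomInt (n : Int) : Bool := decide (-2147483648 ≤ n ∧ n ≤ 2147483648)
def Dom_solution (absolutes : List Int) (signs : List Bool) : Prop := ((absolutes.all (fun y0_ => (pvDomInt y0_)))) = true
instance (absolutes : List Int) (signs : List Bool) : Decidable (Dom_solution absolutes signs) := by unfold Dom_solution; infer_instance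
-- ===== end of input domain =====

-- B replaces A's per-element branch-and-accumulate loop by a full-sum-then-correct structure (alternative decomposition, same cost).


-- ===== PORT A =====
-- A: loop over zip, add or subtract each absolute depending on its sign
def solution (absolutes : List Int) (signs : List Bool) : Int :=
  (absolutes.zip signs).foldl
    (fun answer p => if p.2 then answer + p.1 else answer - p.1) 0

-- ===== PORT B =====
-- B: grand total of paired absolutes, minus twice the sum of those with a falsy sign
def solution_alt (absolutes : List Int) (signs : List Bool) : Int :=
  let total := (((absolutes.zip signs).map (fun p => p.1)).sum)
  total - 2 * (((absolutes.zip signs).filter (fun p => !p.2)).map (fun p => p.1)).sum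

-- ===== PRECONDITION & SPEC =====
def Spec_solution (absolutes : List Int) (signs : List Bool) (out : Int) : Prop := out = solution_alt absolutes signs
instance (absolutes : List Int) (signs : List Bool) (out : Int) : Decidable (Spec_solution absolutes signs out) := by unfold Spec_solution; infer_instance

-- ===== CLAIM (what is proved, stated in full; the proofs are below) =====
def Claim_equal_solution : Prop := ∀ (absolutes : List Int) (signs : List Bool), Dom_solution absolutes signs → Spec_solution absolutes signs (solution absolutes signs)

-- ===== LEMMAS AND PROOFS =====
-- loop invariant: A's fold from any accumulator equals accumulator plus B's expression on the zipped list
theorem solution_fold_eq (l : List (Int × Bool)) (acc : Int) :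
    l.foldl (fun answer p => if p.2 then answer + p.1 else answer - p.1) acc
    = acc + ((l.map (fun p => p.1)).sum
        - 2 * ((l.filter (fun p => !p.2)).map (fun p => p.1)).sum) := by
  induction l generalizing acc with
  | nil => simp
  | cons h t ih =>
    rcases h with ⟨a, s⟩
    cases s <;> simp [List.foldl, List.filter, ih] <;> ring

-- ===== VERDICT (by name: the statement is the Claim_ definition above) =====
theorem solution_spec : Claim_equal_solution := by
  intro absolutes signs _
  show _ = _
  simp [solution, solution_alt, solution_fold_eq]
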